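/- GENERATED by mk_final_copies.py from the proof of the farm's unit `start_decoder.C3a` (farm:start_decoder.C3a.1: Lemmas.lean) as the
   re-elaboration sweep compiled it — do not edit. -/
/-
  WORKED PROOF of the unit `start_decoder.C3a` (0x1144ee … 0x114536: `current_length = get_bits(f, 5) + 1`, `current_entry = 0`, the jump to
  the head of loop 3776), from the two walks of the worker of `start_decoder.C3` (attempt 1). The invariant `C3.Inv`, its frame lemma
  `C3.Inv.carry` and `C3.step_of_call` are names of the tree (Vorbis/Spec/StartDecoderC3.lean).
-/
import Asan.CheckWalk
import Vorbis.Spec.StartDecoderATest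
import Vorbis.Spec.Units.start_decoder_C3a

open X86 X86.User Asan Vorbis Vorbis.Spec Vorbis.Spec.StartDecoder

set_option maxRecDepth 4000

namespace Vorbis.Spec.start_decoder_C3a

set_option maxHeartbeats 4000000 in
/-- **THE FIRST BASIC BLOCK OF THE SEGMENT, WALKED** (0x1144ee … 0x1144fd; stb_vorbis_fixed.c:3775 `current_length = get_bits(f,5) + 1`):
from the entry assertion `InC3` the machine reaches the return of `get_bits(f, 5)` at `cut102` with the invariant `Inv` (nothing
filled yet) and `eax < 32`. The pattern of every call of the segment: `pre_<addr>` from `Inv` (`ShadowInv.lower`, `readerEnv`,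
`Reader.store_off_obj`), then `step_of_call` + `Inv.carry` at the returned state. -/
theorem c3a_reach_cut102 {Lay : Layout} (hLay : Lay.hi = 0x1000000) {μ : Microarch} (hμ : UserX.MicroOK μ) {u₀ : State}
    (hcode : HasCodeNat Lay u₀ Vorbis.L.start_decoder.entry Vorbis.Code.code_start_decoder.nat Vorbis.L.start_decoder.size)
    (h_get_bits : ∀ (others : List Obj) (frames : List (Nat × FrameLayout)) (Blk : Block → Prop) (len : Nat),
      Calls Lay μ Vorbis.WayInv (Vorbis.conv u₀) Vorbis.L.get_bits.entry (Vorbis.Spec.get_bits.spec others frames Blk len))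
    {g : Ghost} {i : Nat} {A2 A3 Ai : Arena} {A : Arena × List Obj} {v : State} (h : InC3 u₀ g i A2 A3 Ai A v) :
    ReachVia Lay μ WayInv v (fun w => C3.Inv u₀ g i A2 A3 Ai A Vorbis.L.start_decoder.cut102 0 w ∧
      (w.reg .rax).toNat < 32) := by
  have hI := C3.Inv.of_inC3 h
  clear h
  have he := hI.frame.entry
  v_entry he
  have hgb := h_get_bits A.2 g.frames' (g.Blk A) g.len
  have hW := hI.where_
  obtain ⟨q1, q2, q3, q4, q5, q6, q7, q8, q9, q10, q11, q12, q13, q14, q15, q16⟩ := hW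
  have w_rip := hI.frame.rip
  have w_eq : Mem.EqOn Vorbis.L.textLo Vorbis.L.textHi u₀.mem v.mem := hI.frame.code
  have hdf : v.flags .df = false := (show abiInv _ from hI.frame.inv).1
  have hmx : v.mxcsr &&& 0x1F80 = 0x1F80 := (show abiInv _ from hI.frame.inv).2
  have hsse := Vorbis.sseOK_of_abiInv hI.frame.inv
  have hRA : g.RA = (g.e.reg .rsp).toNat := rfl
  have hsp : (v.reg .rsp).toNat = g.R := by
    rw [hI.frame.rsp]
    exact toNat_addr _ (by omega)
  have hslotf : v.mem.readLE (v.reg .rsp + 24) 8 = g.f := by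
    have := hI.cur.slot_f
    rw [hI.frame.rsp]
    simp only [vfield]
    exact this
  have hslot0 : v.mem.readLE (v.reg .rsp + 36) 4 = 0 := by
    have := hI.cur.sd.frame.z24 (by omega) (by omega)
    rw [hI.frame.rsp]
    simp only [vfield]
    exact this
  u_walk hcode [hμ.vendor] until [Vorbis.L.start_decoder.loop8] span [Vorbis.L.textLo, Vorbis.L.textHi] side (v_side)
  case call_inv => v_inv
  case pre_1144f8 =>
    have hun : ShadowUntouched v.mem s_1144f8.mem := by v_untouched
    have hshp : ShadowPre A.2 g.frames' s_1144f8 :=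
      ⟨(hI.frame.shadow.untouched hun).lower (by rw [w_rsp]; u_omega) (by rw [w_rsp]; u_omega) (by rw [w_rsp]; u_omega),
        hI.frame.offText⟩
    have hkeep := Vorbis.Spec.Reader.store_off_obj hI.cur.sd.bits (v.reg .rsp - 8) 8 1131773 (by u_omega) (by u_omega)
    rw [← w_mem] at hkeep
    have erdi : (s_1144f8.reg .rdi).toNat = g.f := by
      rw [w_rdi]
      exact toNat_addr _ (by omega)
    refine ⟨⟨hshp, ?_, ?_⟩, ?_⟩
    · rw [erdi]
      exact readerEnv hI.cur.hand hI.cur.sd.env.live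
    · rw [erdi]
      exact hkeep.1.bits
    · rw [Vorbis.Spec.bitsArg_def, w_rsi]
      decide
  -- 0x1144fd, get_bits(f, 5) returned: the invariant at the returned state
  simp only [X86.User.Spec.footprint, vspec, w_rsp_1144f8, w_rdi_1144f8] at w_same
  have e_sub : (v.reg .rsp - 8).toNat = g.R - 8 := by u_omega
  have e_f : (UInt64.ofNat g.f).toNat = g.f := toNat_addr _ (by omega)
  rw [e_sub, e_f] at w_same
  have hstep := C3.step_of_call (f := g.f) (cl := Codebook.codeword_lengths v.mem (g.cb v.mem i))
    (lo := 0) (hi := 0) hsp (by omega) (by omega) w_mem_1144f8 w_same (by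
      intro w hw
      simp only [List.mem_cons, List.mem_nil_iff, or_false] at hw
      rcases hw with rfl | rfl | rfl | rfl | rfl | rfl <;> simp only [] <;> omega)
  have w_eq := Vorbis.conv_code_eqOn w_code
  have hpost : Vorbis.Spec.GetBitsSpecPost (g.Blk A) g.len g.f 5 s_1144f8 s_1144f8r := by
    have := w_post
    simp only [Vorbis.Spec.get_bits.spec, Vorbis.Spec.bitsArg_def, w_rdi_1144f8, w_rsi_1144f8, e_f] at this
    exact this
  have hIr := hI.carry (pc' := Vorbis.L.start_decoder.cut102) w_rip w_rsp (w_kept.get .r14 rfl) (w_kept.get .rbx rfl)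
    w_inv hstep (Nat.le_refl _) (Nat.le_refl _) (Nat.zero_le _) hpost.bits.bits
  refine ReachVia.done ⟨hIr, ?_⟩
  have hres := hpost.bits.result
  unfold GetBitsResult at hres
  exact hres.2 (by omega)

set_option maxHeartbeats 4000000 in
/-- **THE SECOND BASIC BLOCK, WALKED** (0x1144fd … 0x114536; lines 3774–3775: `lea r12d,[rax+1] ; mov ebp,[rsp+24H] ; jmp`): from the
returned state of `get_bits(f, 5)` to THE HEAD OF LOOP 3776 (`loop8`) with the loop's invariant: `Inv` with
`ce = current_entry = ebp` (0 here: the literal 0 of `[R + 24H]`, Z24), `1 ≤ current_length = r12 ≤ 32`, `current_entry ≤ entries`. -/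
theorem c3a_reach_loop8 {Lay : Layout} (hLay : Lay.hi = 0x1000000) {μ : Microarch} (hμ : UserX.MicroOK μ) {u₀ : State}
    (hcode : HasCodeNat Lay u₀ Vorbis.L.start_decoder.entry Vorbis.Code.code_start_decoder.nat Vorbis.L.start_decoder.size)
    {g : Ghost} {i : Nat} {A2 A3 Ai : Arena} {A : Arena × List Obj} {v : State}
    (hI : C3.Inv u₀ g i A2 A3 Ai A Vorbis.L.start_decoder.cut102 0 v) (hax : (v.reg .rax).toNat < 32) :
    ReachVia Lay μ WayInv v (fun w => C3.Inv u₀ g i A2 A3 Ai A Vorbis.L.start_decoder.loop8 (w.reg .rbp).toNat w ∧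
      1 ≤ (w.reg .r12).toNat ∧ (w.reg .r12).toNat ≤ 32 ∧
      ((w.reg .rbp).toNat : Int) ≤ Codebook.entries w.mem (g.cb w.mem i)) := by
  have he := hI.frame.entry
  v_entry he
  have hW := hI.where_
  obtain ⟨q1, q2, q3, q4, q5, q6, q7, q8, q9, q10, q11, q12, q13, q14, q15, q16⟩ := hW
  have w_rip := hI.frame.rip
  have w_eq : Mem.EqOn Vorbis.L.textLo Vorbis.L.textHi u₀.mem v.mem := hI.frame.code
  have hdf : v.flags .df = false := (show abiInv _ from hI.frame.inv).1
  have hmx : v.mxcsr &&& 0x1F80 = 0x1F80 := (show abiInv _ from hI.frame.inv).2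
  have hsse := Vorbis.sseOK_of_abiInv hI.frame.inv
  have hRA : g.RA = (g.e.reg .rsp).toNat := rfl
  have hsp : (v.reg .rsp).toNat = g.R := by
    rw [hI.frame.rsp]
    exact toNat_addr _ (by omega)
  have hslotf : v.mem.readLE (v.reg .rsp + 24) 8 = g.f := by
    have := hI.cur.slot_f
    rw [hI.frame.rsp]
    simp only [vfield]
    exact this
  have hslot0 : v.mem.readLE (v.reg .rsp + 36) 4 = 0 := by
    have := hI.cur.sd.frame.z24 (by omega) (by omega)
    rw [hI.frame.rsp]
    simp only [vfield]
    exact this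
  u_walk hcode [hμ.vendor] until [Vorbis.L.start_decoder.loop8] span [Vorbis.L.textLo, Vorbis.L.textHi] side (v_side)
  -- 0x114536, the head of loop 3776: current_entry = 0 (the literal 0 of [R+24H]), current_length = eax + 1
  have hinv : (conv u₀).inv s_114505 := by v_inv
  have hs : Mem.SameExcept (C3.stepWins g.R g.f (Codebook.codeword_lengths v.mem (g.cb v.mem i)) 0 0)
      v.mem s_114505.mem := by
    rw [w_mem]
    exact Mem.SameExcept.refl _ _
  have hbits : Bits (g.Blk A) g.len s_114505.mem g.f := by
    rw [w_mem]
    exact hI.cur.sd.bits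
  have hIr := hI.carry (pc' := Vorbis.L.start_decoder.loop8) w_rip (w_kept.get .rsp rfl) (w_kept.get .r14 rfl)
    (w_kept.get .rbx rfl) hinv hs (Nat.le_refl _) (Nat.le_refl _) (Nat.zero_le _) hbits
  have e0 : (s_114505.reg .rbp).toNat = 0 := by
    rw [w_rbp]
    rfl
  have e12 : (s_114505.reg .r12).toNat = (v.reg .rax).toNat + 1 := by
    rw [w_r12, Vorbis.toNat_ofBV32]
    simp only [BitVec.toNat_setWidth, UInt64.toNat_toBitVec, UInt64.toNat_add]
    have e1 : (1 : UInt64).toNat = 1 := rfl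
    rw [e1]
    omega
  refine ReachVia.done ⟨?_, by omega, by omega, ?_⟩
  · rw [e0]
    exact hIr
  · rw [e0]
    exact hIr.k1.ent_nonneg

end Vorbis.Spec.start_decoder_C3a
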